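-- pv_equiv track=rewrite | github.com/Yssnogood/FFXIV_Cratfing_Shopping_List | Helpers/Recipes.py | multipleCraft
-- ===== SOURCE A (Python) =====
-- def multipleCraft(listRecipe, howMany=1):
--     """"""
--     multipleCraftList = []
--     for x in range(0, len(listRecipe)):
--         if x%2 != 0:
--             multipleCraftList.append(listRecipe[x]*howMany)
--         else:
--             multipleCraftList.append(listRecipe[x])
--     return multipleCraftList
-- ===== SOURCE B (Python) =====
-- def multipleCraft(listRecipe, howMany=1):
--     """Consume the list pairwise: keep each even-position element as is,
--     multiply the following odd-position element; no index arithmetic."""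
--     result = []
--     it = iter(listRecipe)
--     for even in it:
--         result.append(even)
--         odd = next(it, None)
--         if odd is not None:
--             result.append(odd * howMany)
--     return result
-- ===== Notes on version B (the rewrite author's own statement) =====
-- stated objective: alternative
-- what changed: Replaces the index loop with its x%2 parity branch by a pairwise consumption of the list (iterator advanced twice per round), so no indices or parity tests exist at all.
import Mathlib
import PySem

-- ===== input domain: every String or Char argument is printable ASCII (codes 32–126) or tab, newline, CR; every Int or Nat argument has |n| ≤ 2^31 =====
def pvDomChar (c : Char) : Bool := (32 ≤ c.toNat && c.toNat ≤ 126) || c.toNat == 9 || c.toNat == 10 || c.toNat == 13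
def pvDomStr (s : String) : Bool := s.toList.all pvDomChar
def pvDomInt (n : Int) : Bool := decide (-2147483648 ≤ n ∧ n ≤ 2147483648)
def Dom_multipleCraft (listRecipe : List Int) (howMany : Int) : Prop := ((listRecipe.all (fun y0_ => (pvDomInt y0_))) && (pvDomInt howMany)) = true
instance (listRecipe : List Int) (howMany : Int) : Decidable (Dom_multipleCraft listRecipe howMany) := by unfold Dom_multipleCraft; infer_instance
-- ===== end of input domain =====

-- B consumes the list pairwise instead of A's index loop with a parity branch; objective: alternative (same cost).

-- ===== PORT A =====
-- for x in range(0, len(listRecipe)): append listRecipe[x]*howMany if x%2 != 0 else listRecipe[x]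
def multipleCraft (listRecipe : List Int) (howMany : Int) : List Int :=
  (PySem.List.pyRange 0 (listRecipe.length : Int) 1).foldl
    (fun acc x =>
      if PySem.Int.mod x 2 ≠ 0 then acc ++ [PySem.List.pyGetD listRecipe x 0 * howMany]
      else acc ++ [PySem.List.pyGetD listRecipe x 0]) []

-- ===== PORT B =====
-- the for-loop over the iterator takes one element per round and a second one via next(it, None)
def multipleCraft_alt (listRecipe : List Int) (howMany : Int) : List Int :=
  match listRecipe with
  | [] => []
  | [a] => [a]
  | a :: b :: t => a :: b * howMany :: multipleCraft_alt t howMany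

-- ===== PRECONDITION & SPEC =====
def Spec_multipleCraft (listRecipe : List Int) (howMany : Int) (out : List Int) : Prop := out = multipleCraft_alt listRecipe howMany
instance (listRecipe : List Int) (howMany : Int) (out : List Int) : Decidable (Spec_multipleCraft listRecipe howMany out) := by unfold Spec_multipleCraft; infer_instance

-- ===== CLAIM (what is proved, stated in full; the proofs are below) =====
def Claim_equal_multipleCraft : Prop := ∀ (listRecipe : List Int) (howMany : Int), Dom_multipleCraft listRecipe howMany → Spec_multipleCraft listRecipe howMany (multipleCraft listRecipe howMany)

-- ===== LEMMAS AND PROOFS =====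

-- A's loop from an even index k, whose remaining suffix is t, appends exactly B's result on t.
theorem multipleCraft_loop (l : List Int) (h : Int) :
    ∀ (t : List Int) (k : Nat) (acc : List Int), l.drop k = t → k % 2 = 0 →
    (PySem.List.pyRange (k : Int) (l.length : Int) 1).foldl
      (fun acc x =>
        if PySem.Int.mod x 2 ≠ 0 then acc ++ [PySem.List.pyGetD l x 0 * h]
        else acc ++ [PySem.List.pyGetD l x 0]) acc
      = acc ++ multipleCraft_alt t h := by
  intro t
  induction t using multipleCraft_alt.induct with
  | case1 =>
      intro k acc hdrop _
      have hge : l.length ≤ k := by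
        have := congrArg List.length hdrop
        simp at this; omega
      rw [PySem.List.pyRange_one_eq_nil (by exact_mod_cast hge)]
      simp [multipleCraft_alt]
  | case2 a =>
      intro k acc hdrop hk
      have hlen : l.length = k + 1 := by
        have := congrArg List.length hdrop
        simp at this; omega
      have hlt : (k : Int) < (l.length : Int) := by exact_mod_cast (by omega : k < l.length)
      rw [PySem.List.pyRange_one_cons hlt, PySem.List.pyRange_one_eq_nil (by push_cast [hlen]; omega)]
      have hget : PySem.List.pyGetD l (k : Int) 0 = a := by
        have h0 : l[k]? = some a := by
          have hd := (List.getElem?_drop : (List.drop k l)[0]? = l[k + 0]?)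
          rw [hdrop] at hd; simpa using hd.symm
        rw [PySem.List.pyGetD_of_nonneg l 0 (by omega)]
        simp [List.getD_eq_getElem?_getD, h0]
      have hmk : PySem.Int.mod (k : Int) 2 = 0 := by
        rw [show ((2 : Int)) = ((2 : Nat) : Int) from rfl, PySem.Int.mod_natCast]
        exact_mod_cast hk
      simp only [List.foldl_cons, List.foldl_nil, hmk, hget]
      rw [if_neg (by omega : ¬((0:Int) ≠ 0))]
      simp [multipleCraft_alt]
  | case3 a b t ih =>
      intro k acc hdrop hk
      have hlen : l.length = k + 2 + t.length := by
        have := congrArg List.length hdrop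
        simp at this; omega
      have hlt1 : (k : Int) < (l.length : Int) := by exact_mod_cast (by omega : k < l.length)
      have hlt2 : ((k : Int) + 1) < (l.length : Int) := by
        have : k + 1 < l.length := by omega
        exact_mod_cast this
      rw [PySem.List.pyRange_one_cons hlt1, PySem.List.pyRange_one_cons hlt2]
      have hga : PySem.List.pyGetD l (k : Int) 0 = a := by
        have h0 : l[k]? = some a := by
          have hd := (List.getElem?_drop : (List.drop k l)[0]? = l[k + 0]?)
          rw [hdrop] at hd; simpa using hd.symm
        rw [PySem.List.pyGetD_of_nonneg l 0 (by omega)]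
        simp [List.getD_eq_getElem?_getD, h0]
      have hgb : PySem.List.pyGetD l ((k : Int) + 1) 0 = b := by
        have h1 : l[k + 1]? = some b := by
          have hd := (List.getElem?_drop : (List.drop k l)[1]? = l[k + 1]?)
          rw [hdrop] at hd; simpa using hd.symm
        rw [PySem.List.pyGetD_of_nonneg l 0 (by omega)]
        have ht : ((k : Int) + 1).toNat = k + 1 := by omega
        simp [ht, List.getD_eq_getElem?_getD, h1]
      have hdrop2 : l.drop (k + 2) = t := by
        have := congrArg (List.drop 2) hdrop
        simpa [List.drop_drop, Nat.add_comm] using this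
      have hmk : PySem.Int.mod (k : Int) 2 = 0 := by
        rw [show ((2 : Int)) = ((2 : Nat) : Int) from rfl, PySem.Int.mod_natCast]
        exact_mod_cast hk
      have hmk1 : PySem.Int.mod ((k : Int) + 1) 2 = 1 := by
        rw [show ((k : Int) + 1) = ((k + 1 : Nat) : Int) by push_cast; ring,
            show ((2 : Int)) = ((2 : Nat) : Int) from rfl, PySem.Int.mod_natCast]
        have : (k + 1) % 2 = 1 := by omega
        exact_mod_cast this
      simp only [List.foldl_cons, hmk, hmk1, hga, hgb]
      rw [if_neg (by omega : ¬((0:Int) ≠ 0)), if_pos (by omega : (1:Int) ≠ 0)]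
      have hcast2 : (k : Int) + 1 + 1 = ((k + 2 : Nat) : Int) := by push_cast; ring
      rw [hcast2, ih (k + 2) (acc ++ [a] ++ [b * h]) hdrop2 (by omega)]
      simp [multipleCraft_alt]

-- ===== VERDICT (by name: the statement is the Claim_ definition above) =====
theorem multipleCraft_spec : Claim_equal_multipleCraft := by
  intro l h _
  unfold Spec_multipleCraft multipleCraft
  simpa using multipleCraft_loop l h l 0 [] (by simp) (by omega)
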